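-- pv_equiv track=rewrite | github.com/m7mdony/GPC-FTW | 2022/crane/main.py | neighbor
-- ===== SOURCE A (Python) =====
-- def neighbor(i,j,map):
--     # Define the relative positions of the 8 adjacent cells
--     neighbors_relative_positions = [
--         (-1, -1), (-1, 0), (-1, 1),
--         (0, -1),           (0, 1),
--         (1, -1), (1, 0), (1, 1)
--     ]
--
--     # Initialize a list to store the content of neighboring cells
--     neighbor_contents = []
--
--     # Iterate through the relative positions and check the content of neighboring cells
--     for dx, dy in neighbors_relative_positions:
--         # Calculate the absolute position of the neighbor
--         neighbor_x = i + dx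
--         neighbor_y = j + dy
--
--         # Check if the neighbor is within the bounds of the map
--         if 0 <= neighbor_x < len(map) and 0 <= neighbor_y < len(map[0]):
--             # Get the content of the neighbor cell
--             neighbor_content = map[neighbor_x][neighbor_y]
--             neighbor_contents.append(neighbor_content)
--     return neighbor_contents
--
-- map=[]
-- ===== SOURCE B (Python) =====
-- def neighbor(i, j, map):
--     # clamped-range formulation: compute the in-bounds 3x3 window once,
--     # then walk it in row-major order skipping the center cell
--     if not map:
--         return []
--     rows = range(max(0, i - 1), min(len(map), i + 2))
--     cols = range(max(0, j - 1), min(len(map[0]), j + 2))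
--     return [map[x][y] for x in rows for y in cols if (x, y) != (i, j)]
-- ===== Notes on version B (the rewrite author's own statement) =====
-- stated objective: simpler
-- what changed: replaces the eight explicit offset tuples each with its own bounds test by two clamped ranges computed up front and a single row-major comprehension that skips the center cell
import Mathlib
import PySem

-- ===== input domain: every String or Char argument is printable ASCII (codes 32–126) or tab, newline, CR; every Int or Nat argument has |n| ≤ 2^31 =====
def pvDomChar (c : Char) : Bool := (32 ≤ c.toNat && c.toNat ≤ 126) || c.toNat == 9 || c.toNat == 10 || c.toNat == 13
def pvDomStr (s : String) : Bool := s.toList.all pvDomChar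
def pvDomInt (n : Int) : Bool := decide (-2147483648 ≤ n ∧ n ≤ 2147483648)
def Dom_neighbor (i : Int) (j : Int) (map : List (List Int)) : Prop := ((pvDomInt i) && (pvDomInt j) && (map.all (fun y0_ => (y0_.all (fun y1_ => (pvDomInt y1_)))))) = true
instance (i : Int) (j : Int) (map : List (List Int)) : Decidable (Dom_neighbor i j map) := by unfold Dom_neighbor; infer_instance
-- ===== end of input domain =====

-- B replaces A's eight explicit offset/bounds checks by two clamped ranges and
-- one row-major comprehension that skips the center (objective: simpler; same cost).

-- ===== PORT A =====
def neighbor (i : Int) (j : Int) (map : List (List Int)) : List Int :=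
  let offs : List (Int × Int) := [(-1,-1),(-1,0),(-1,1),(0,-1),(0,1),(1,-1),(1,0),(1,1)]
  offs.foldl (fun acc d =>
    if 0 ≤ i + d.1 ∧ i + d.1 < (map.length : Int) ∧
       0 ≤ j + d.2 ∧ j + d.2 < ((PySem.List.pyGetD map 0 []).length : Int) then
      acc ++ [PySem.List.pyGetD (PySem.List.pyGetD map (i + d.1) []) (j + d.2) 0]
    else acc) []

-- ===== PORT B =====
def neighbor_alt (i : Int) (j : Int) (map : List (List Int)) : List Int :=
  match map with
  | [] => []
  | r0 :: rest =>
    let rows := PySem.List.pyRange (max 0 (i - 1)) (min (((r0 :: rest).length : Nat) : Int) (i + 2)) 1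
    let cols := PySem.List.pyRange (max 0 (j - 1)) (min ((r0.length : Nat) : Int) (j + 2)) 1
    rows.flatMap (fun x =>
      cols.filterMap (fun y =>
        if x = i ∧ y = j then none
        else some (PySem.List.pyGetD (PySem.List.pyGetD (r0 :: rest) x []) y 0)))

-- ===== PRECONDITION & SPEC =====
-- Pre_ excludes exactly the inputs on which the Python A raises an IndexError:
-- a ragged map where an adjacent in-range row x is shorter than an accessed
-- column y (y < len(map[0]) but y >= len(map[x])).
def Pre_neighbor (i : Int) (j : Int) (map : List (List Int)) : Prop :=
  ∀ x ∈ [i - 1, i, i + 1], ∀ y ∈ [j - 1, j, j + 1],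
    ¬(x = i ∧ y = j) → 0 ≤ x → x < (map.length : Int) →
    0 ≤ y → y < ((map.headD []).length : Int) →
    y < ((map.getD x.toNat []).length : Int)
instance (i : Int) (j : Int) (map : List (List Int)) : Decidable (Pre_neighbor i j map) := by
  unfold Pre_neighbor; infer_instance
def pvWitness_neighbor : Int × Int × List (List Int) := (1, 1, [[1,2,3],[4,5,6],[7,8,9]])

def Spec_neighbor (i : Int) (j : Int) (map : List (List Int)) (out : List Int) : Prop := out = neighbor_alt i j map
instance (i : Int) (j : Int) (map : List (List Int)) (out : List Int) : Decidable (Spec_neighbor i j map out) := by unfold Spec_neighbor; infer_instance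

-- ===== CLAIM (what is proved, stated in full; the proofs are below) =====
def Claim_equal_neighbor : Prop := ∀ (i : Int) (j : Int) (map : List (List Int)), Dom_neighbor i j map → Pre_neighbor i j map → Spec_neighbor i j map (neighbor i j map)

-- ===== LEMMAS AND PROOFS =====

-- proof-side helpers: width of row 0 / cell access / one guarded cell of A's loop
def pvW (map : List (List Int)) : Nat := (PySem.List.pyGetD map 0 []).length
def pvCell (map : List (List Int)) (x y : Int) : Int :=
  PySem.List.pyGetD (PySem.List.pyGetD map x []) y 0
def pvT (map : List (List Int)) (x y : Int) : List Int :=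
  if 0 ≤ x ∧ x < (map.length : Int) ∧ 0 ≤ y ∧ y < ((pvW map : Nat) : Int) then [pvCell map x y] else []

theorem ite_append_acc (c : Prop) [Decidable c] (acc s : List Int) :
    (if c then acc ++ s else acc) = acc ++ (if c then s else []) := by
  split_ifs <;> simp

theorem flatMap_ite {α β : Type} (c : Prop) [Decidable c] (x : α) (f : α → List β) :
    (if c then [x] else []).flatMap f = if c then f x else [] := by
  split_ifs <;> simp [List.flatMap]

theorem filterMap_ite {α β : Type} (c : Prop) [Decidable c] (x : α) (f : α → Option β) :
    List.filterMap f (if c then [x] else []) = if c then (f x).toList else [] := by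
  split_ifs with h
  · cases hfx : f x <;> simp [List.filterMap_cons, hfx]
  · simp

theorem toList_ite (c : Prop) [Decidable c] (v : Int) :
    (if c then none else some v).toList = if c then [] else [v] := by
  split_ifs <;> simp

theorem ite_append_split (c : Prop) [Decidable c] (s t : List Int) :
    (if c then s ++ t else []) = (if c then s else []) ++ (if c then t else []) := by
  split_ifs <;> simp

theorem ite_ite_collapse (c d : Prop) [Decidable c] [Decidable d] (s : List Int) :
    (if c then if d then s else [] else []) = if c ∧ d then s else [] := by
  split_ifs <;> simp_all

-- the clamped range [max 0 (c-1), min m (c+2)) is exactly the in-bounds part of [c-1, c, c+1]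
theorem range3 (c : Int) (m : Nat) :
    PySem.List.pyRange (max 0 (c - 1)) (min (m : Int) (c + 2)) 1 =
      (if 0 ≤ c - 1 ∧ c - 1 < (m : Int) then [c - 1] else []) ++
      (if 0 ≤ c ∧ c < (m : Int) then [c] else []) ++
      (if 0 ≤ c + 1 ∧ c + 1 < (m : Int) then [c + 1] else []) := by
  by_cases h1 : 0 ≤ c - 1 ∧ c - 1 < (m : Int) <;>
  by_cases h2 : 0 ≤ c ∧ c < (m : Int) <;>
  by_cases h3 : 0 ≤ c + 1 ∧ c + 1 < (m : Int) <;>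
  simp only [h1, h2, h3, if_true, if_false, List.append_nil, List.nil_append] <;>
  rw [PySem.List.pyRange_one] <;>
  first
  | (exfalso; omega)
  | (rw [show (min (m:Int) (c+2) - max 0 (c-1)).toNat = 3 from by omega];
     simp [List.range_succ] <;> omega)
  | (rw [show (min (m:Int) (c+2) - max 0 (c-1)).toNat = 2 from by omega];
     simp [List.range_succ] <;> omega)
  | (rw [show (min (m:Int) (c+2) - max 0 (c-1)).toNat = 1 from by omega];
     simp [List.range_succ] <;> omega)
  | (rw [show (min (m:Int) (c+2) - max 0 (c-1)).toNat = 0 from by omega];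
     simp [List.range_succ])

-- A's eight-offset loop, flattened into eight guarded singleton cells
theorem A_norm (i j : Int) (map : List (List Int)) :
    neighbor i j map =
      pvT map (i-1) (j-1) ++ pvT map (i-1) j ++ pvT map (i-1) (j+1) ++
      pvT map i (j-1) ++ pvT map i (j+1) ++
      pvT map (i+1) (j-1) ++ pvT map (i+1) j ++ pvT map (i+1) (j+1) := by
  simp only [neighbor, List.foldl_cons, List.foldl_nil]
  simp only [ite_append_acc]
  simp only [List.nil_append, List.append_assoc]
  simp only [pvT, pvCell, pvW, show ∀ a : Int, a + (-1) = a - 1 from fun a => by ring,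
    add_zero]

theorem neighbor_main : ∀ (i j : Int) (map : List (List Int)), neighbor i j map = neighbor_alt i j map := by
  intro i j map
  cases map with
  | nil =>
    rw [A_norm]
    have h : ∀ x y : Int, pvT [] x y = [] := by
      intro x y; unfold pvT
      rw [if_neg]; rintro ⟨_, h2, _⟩; simp at h2; omega
    simp [neighbor_alt, h]
  | cons r0 rest =>
    rw [A_norm]
    simp only [neighbor_alt]
    rw [range3 i (r0 :: rest).length, range3 j r0.length]
    simp only [List.flatMap_append, flatMap_ite, List.filterMap_append, filterMap_ite,
      toList_ite]
    simp only [ite_append_split, ite_ite_collapse, List.append_assoc, List.append_nil,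
      List.nil_append]
    simp [pvT, pvCell, pvW, PySem.List.pyGetD_zero_cons, and_assoc,
      eq_false (show (i - 1 : Int) ≠ i from by omega),
      eq_false (show (i + 1 : Int) ≠ i from by omega),
      eq_false (show (j - 1 : Int) ≠ j from by omega),
      eq_false (show (j + 1 : Int) ≠ j from by omega),
      List.append_assoc]

-- ===== VERDICT (by name: the statement is the Claim_ definition above) =====
theorem neighbor_spec : Claim_equal_neighbor := by
  intro i j map _ _
  unfold Spec_neighbor
  exact neighbor_main i j map
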